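-- pv_equiv track=rewrite | github.com/KirillBuchnev/Laba | 1.py | DigitCountSum
-- ===== SOURCE A (Python) =====
-- def DigitCountSum(k,c):
--     count = 0
--     s = 0
--     k = str(k)
--     for i in k:
--         if i == str(c):
--             count +=1
--             s += int(i)
--     return count, s
-- ===== SOURCE B (Python) =====
-- def DigitCountSum(k, c):
--     # Pure arithmetic: peel decimal digits of abs(k) with divmod, no string conversion.
--     if not (0 <= c <= 9):
--         return 0, 0
--     n = abs(k)
--     cnt = 0
--     while True:
--         n, d = divmod(n, 10)
--         if d == c:
--             cnt += 1
--         if n == 0: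
--             break
--     return cnt, cnt * c
-- ===== Notes on version B (the rewrite author's own statement) =====
-- stated objective: alternative
-- what changed: Replaces A's scan over the characters of str(k) with dual accumulators by pure arithmetic: a divmod-by-10 loop peels the decimal digits of abs(k) and counts those equal to c (only possible when 0<=c<=9), with the sum derived in closed form as cnt*c; no string is ever built.
import Mathlib
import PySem

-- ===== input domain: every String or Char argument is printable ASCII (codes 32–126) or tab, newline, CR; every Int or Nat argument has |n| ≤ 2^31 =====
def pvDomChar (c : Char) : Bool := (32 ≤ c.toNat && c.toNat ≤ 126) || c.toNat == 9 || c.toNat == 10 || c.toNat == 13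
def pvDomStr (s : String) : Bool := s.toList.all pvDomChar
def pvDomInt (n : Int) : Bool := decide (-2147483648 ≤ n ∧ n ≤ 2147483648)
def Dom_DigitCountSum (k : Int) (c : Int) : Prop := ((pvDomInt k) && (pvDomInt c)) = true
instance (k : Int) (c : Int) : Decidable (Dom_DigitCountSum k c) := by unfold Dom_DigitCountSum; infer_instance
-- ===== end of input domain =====

-- B replaces A's character scan over str(k) by a purely arithmetic divmod-by-10 loop over
-- abs(k), counting digits equal to c (only possible when 0<=c<=9) and deriving the sum in
-- closed form as cnt*c (objective: alternative — no string is built at all).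

-- ===== PORT A =====
-- literal transliteration of A: iterate over the characters of str(k) with the two
-- accumulators (count, s); 'int(i)' is ported as ofChars? with getD 0 — exact here because the
-- branch fires only when [i] = str(c), and then i is a decimal digit, so ofChars? is some.
def DigitCountSum (k : Int) (c : Int) : Int × Int :=
  (PySem.Int.toChars k).foldl
    (fun (p : Int × Int) i =>
      if [i] = PySem.Int.toChars c then (p.1 + 1, p.2 + (PySem.Int.ofChars? [i]).getD 0)
      else p)
    (0, 0)

-- ===== PORT B =====
-- transliteration of Source B's while loop: n, d = divmod(n, 10); if d == c: cnt += 1; stop when n == 0.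
def pvAltLoop (n : Nat) (c : Int) (cnt : Int) : Int :=
  let cnt' := if ((n % 10 : Nat) : Int) = c then cnt + 1 else cnt
  if _h : n / 10 = 0 then cnt' else pvAltLoop (n / 10) c cnt'
termination_by n
decreasing_by omega

def DigitCountSum_alt (k : Int) (c : Int) : Int × Int :=
  if 0 ≤ c ∧ c ≤ 9 then
    let cnt := pvAltLoop k.natAbs c 0
    (cnt, cnt * c)
  else (0, 0)

-- ===== PRECONDITION & SPEC =====
def Spec_DigitCountSum (k : Int) (c : Int) (out : Int × Int) : Prop := out = DigitCountSum_alt k c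
instance (k : Int) (c : Int) (out : Int × Int) : Decidable (Spec_DigitCountSum k c out) := by unfold Spec_DigitCountSum; infer_instance

-- ===== CLAIM (what is proved, stated in full; the proofs are below) =====
def Claim_equal_DigitCountSum : Prop := ∀ (k : Int) (c : Int), Dom_DigitCountSum k c → Spec_DigitCountSum k c (DigitCountSum k c)

-- ===== LEMMAS AND PROOFS =====

-- the decimal digit characters of n, most significant first (proof-only mirror of the loops)
def digitsList (n : Nat) : List Char :=
  (if _h : n / 10 = 0 then [] else digitsList (n / 10)) ++ [Nat.digitChar (n % 10)]
termination_by n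
decreasing_by omega

-- toDigitsCore with sufficient fuel produces digitsList followed by the accumulator
lemma toDigitsCore_eq : ∀ (f n : Nat) (acc : List Char), n < f →
    Nat.toDigitsCore 10 f n acc = digitsList n ++ acc := by
  intro f
  induction f with
  | zero => omega
  | succ f ih =>
    intro n acc hn
    rw [Nat.toDigitsCore]
    by_cases hz : n / 10 = 0
    · rw [if_pos hz, digitsList, dif_pos hz]; simp
    · rw [if_neg hz, ih (n / 10) _ (by omega)]
      conv_rhs => rw [digitsList]
      rw [dif_neg hz]
      simp

lemma toDigits_eq (m : Nat) : Nat.toDigits 10 m = digitsList m := by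
  simpa [Nat.toDigits] using toDigitsCore_eq (m + 1) m [] (by omega)

lemma digitChar_inj : ∀ m : Nat, m < 10 → ∀ j : Nat, j < 10 →
    (Nat.digitChar m = Nat.digitChar j ↔ m = j) := by decide

lemma dash_ne_digitChar : ∀ j : Nat, j < 10 → ('-' : Char) ≠ Nat.digitChar j := by decide

-- B's loop counts exactly the occurrences of the digit character in digitsList
lemma altLoop_eq (c : Int) (j : Nat) (hj : j < 10) (hcj : c = (j : Int)) :
    ∀ n cnt, pvAltLoop n c cnt = cnt + ((digitsList n).count (Nat.digitChar j) : Int) := by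
  intro n
  induction n using Nat.strong_induction_on with
  | _ n ih =>
    intro cnt
    rw [pvAltLoop]
    have h10 : n % 10 < 10 := Nat.mod_lt _ (by norm_num)
    have hL : digitsList n
        = (if _h : n / 10 = 0 then [] else digitsList (n / 10)) ++ [Nat.digitChar (n % 10)] := by
      rw [digitsList]
    have hcond : (((n % 10 : Nat) : Int) = c) ↔ (Nat.digitChar (n % 10) = Nat.digitChar j) := by
      rw [digitChar_inj _ h10 _ hj, hcj]
      omega
    rw [hL]
    by_cases hz : n / 10 = 0
    · rw [dif_pos hz]
      by_cases hd : Nat.digitChar (n % 10) = Nat.digitChar j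
      · rw [if_pos (hcond.mpr hd), hd, dif_pos hz]
        simp
      · rw [if_neg (fun h => hd (hcond.mp h)), dif_pos hz]
        simp [hd]
    · rw [dif_neg hz, ih (n / 10) (by omega), List.count_append]
      by_cases hd : Nat.digitChar (n % 10) = Nat.digitChar j
      · rw [if_pos (hcond.mpr hd), hd, dif_neg hz]
        simp
        ring
      · rw [if_neg (fun h => hd (hcond.mp h)), dif_neg hz]
        simp [hd]

-- the character count of str(k) equals the digit count of abs(k) for a digit character
lemma toChars_count (k : Int) (j : Nat) (hj : j < 10) :
    (PySem.Int.toChars k).count (Nat.digitChar j) = (digitsList k.natAbs).count (Nat.digitChar j) := by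
  unfold PySem.Int.toChars
  by_cases hk : k < 0
  · rw [if_pos hk, toDigits_eq]
    simp [dash_ne_digitChar j hj]
  · rw [if_neg hk, toDigits_eq]
    congr 2
    omega

-- A's loop with the comparison specialised to a fixed digit character d.
lemma fold_digit (d : Char) :
    ∀ (l : List Char) (a b : Int),
      l.foldl
        (fun (p : Int × Int) i =>
          if [i] = [d] then (p.1 + 1, p.2 + (PySem.Int.ofChars? [i]).getD 0) else p)
        (a, b)
      = (a + l.count d, b + (l.count d : Int) * (PySem.Int.ofChars? [d]).getD 0) := by
  intro l
  induction l with
  | nil => intro a b; simp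
  | cons h t ih =>
    intro a b
    by_cases hd : h = d
    · subst hd
      simp only [List.foldl_cons, reduceIte]
      rw [ih, List.count_cons_self]
      refine Prod.ext ?_ ?_ <;> push_cast <;> ring
    · have hne : ¬ ([h] = [d]) := by simpa using hd
      simp only [List.foldl_cons]
      rw [if_neg hne, ih, List.count_cons_of_ne hd]

-- toDigitsCore on a nonempty accumulator: positive fuel ⇒ at least one character.
lemma toDigitsCore_pos (f m : Nat) (hf : 0 < f) :
    1 ≤ (Nat.toDigitsCore 10 f m []).length := by
  cases f with
  | zero => omega
  | succ f =>
    simp only [Nat.toDigitsCore]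
    split
    · simp
    · rw [Nat.toDigitsCore_lens_eq]
      omega

lemma toDigits_pos (m : Nat) : 1 ≤ (Nat.toDigits 10 m).length :=
  toDigitsCore_pos _ _ (Nat.succ_pos m)

lemma toDigits_two_le (m : Nat) (hm : 10 ≤ m) : 2 ≤ (Nat.toDigits 10 m).length := by
  unfold Nat.toDigits
  cases m with
  | zero => omega
  | succ m =>
    simp only [Nat.toDigitsCore]
    have h10 : (m + 1) / 10 ≠ 0 := by
      have : 1 ≤ (m + 1) / 10 := Nat.one_le_div_iff (by norm_num) |>.mpr hm
      omega
    rw [if_neg h10]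
    split
    · simp
    · rw [Nat.toDigitsCore_lens_eq, Nat.toDigitsCore_lens_eq]
      omega

-- str(c) has at least two characters when c is not a single digit.
lemma toChars_len_two (c : Int) (hc : ¬ (0 ≤ c ∧ c ≤ 9)) :
    2 ≤ (PySem.Int.toChars c).length := by
  unfold PySem.Int.toChars
  by_cases hneg : c < 0
  · rw [if_pos hneg]
    have := toDigits_pos c.natAbs
    simp only [List.length_cons]
    omega
  · rw [if_neg hneg]
    apply toDigits_two_le
    omega

-- In the non-digit case A's branch never fires.
lemma fold_nofire (c : Int) (hc : ¬ (0 ≤ c ∧ c ≤ 9)) :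
    ∀ (l : List Char) (p : Int × Int),
      l.foldl
        (fun (p : Int × Int) i =>
          if [i] = PySem.Int.toChars c then (p.1 + 1, p.2 + (PySem.Int.ofChars? [i]).getD 0) else p)
        p = p := by
  intro l
  induction l with
  | nil => intro p; rfl
  | cons h t ih =>
    intro p
    have hne : ¬ ([h] = PySem.Int.toChars c) := by
      intro he
      have := toChars_len_two c hc
      rw [← he] at this
      simp at this
    simp [List.foldl_cons, hne, ih]

-- digit case, abstracted over the ten digit values
lemma main_digit (k c : Int) (j : Nat) (hj : j < 10) (hcj : c = (j : Int))
    (hc : PySem.Int.toChars c = [Nat.digitChar j])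
    (hv : (PySem.Int.ofChars? [Nat.digitChar j]).getD 0 = c) :
    DigitCountSum k c = DigitCountSum_alt k c := by
  unfold DigitCountSum DigitCountSum_alt
  rw [hc, fold_digit, hv]
  rw [if_pos (show 0 ≤ c ∧ c ≤ 9 by omega)]
  rw [altLoop_eq c j hj hcj, toChars_count k j hj]
  simp

-- ===== VERDICT (by name: the statement is the Claim_ definition above) =====
theorem DigitCountSum_spec : Claim_equal_DigitCountSum := by
  intro k c _
  unfold Spec_DigitCountSum
  by_cases h : 0 ≤ c ∧ c ≤ 9
  · obtain ⟨h0, h9⟩ := h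
    interval_cases c
    · exact main_digit k 0 0 (by omega) (by decide) (by decide) (by decide)
    · exact main_digit k 1 1 (by omega) (by decide) (by decide) (by decide)
    · exact main_digit k 2 2 (by omega) (by decide) (by decide) (by decide)
    · exact main_digit k 3 3 (by omega) (by decide) (by decide) (by decide)
    · exact main_digit k 4 4 (by omega) (by decide) (by decide) (by decide)
    · exact main_digit k 5 5 (by omega) (by decide) (by decide) (by decide)
    · exact main_digit k 6 6 (by omega) (by decide) (by decide) (by decide)
    · exact main_digit k 7 7 (by omega) (by decide) (by decide) (by decide)
    · exact main_digit k 8 8 (by omega) (by decide) (by decide) (by decide)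
    · exact main_digit k 9 9 (by omega) (by decide) (by decide) (by decide)
  · unfold DigitCountSum DigitCountSum_alt
    rw [fold_nofire c h]
    simp [h]
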